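-- pv_equiv track=rewrite | github.com/sojiomiwade/supreme-train | archive-pre-google/three-of-a-kind--five-straight.py | con5
-- ===== SOURCE A (Python) =====
-- from typing import Counter, List
--
-- def con5(arr: List[int]) -> bool:
--     count=Counter(arr)
--     seeds=sorted(count)
--     n=len(count)
--     for x in seeds:
--         val=count[x]
--         if val:
--             for i in range(5):
--                 if x+i not in count or count[x+i]<val:
--                     return False
--                 count[x+i]-=val
--     return True
-- ===== SOURCE B (Python) =====
-- from typing import Counter, List
--
-- def con5(arr: List[int]) -> bool:
--     # Single pass over the sorted distinct values with an "open groups" window;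
--     # never mutates the counter and has no inner 5-step loop.
--     count = Counter(arr)
--     opened = 0   # groups that still need the next consecutive value
--     last = 0     # value seen in the previous iteration (dead until opened > 0)
--     window = []  # how many new groups started at each of the most recent values
--     for n in sorted(count):
--         if opened > 0 and n != last + 1:
--             return False
--         cnt = count[n]
--         if cnt < opened:
--             return False
--         window.append(cnt - opened)
--         if len(window) == 5:
--             opened = cnt - window.pop(0)
--         else:
--             opened = cnt
--         last = n
--     return opened == 0
-- ===== Notes on version B (the rewrite author's own statement) =====
-- stated objective: alternative
-- what changed: Replaces A's bulk counter mutation with a nested subtract-and-check loop over each value's 5-window by a single sliding-window pass over the sorted distinct values that keeps an `opened` count of groups needing continuation and a short window of newly started groups, never mutating the counter.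
import Mathlib
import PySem

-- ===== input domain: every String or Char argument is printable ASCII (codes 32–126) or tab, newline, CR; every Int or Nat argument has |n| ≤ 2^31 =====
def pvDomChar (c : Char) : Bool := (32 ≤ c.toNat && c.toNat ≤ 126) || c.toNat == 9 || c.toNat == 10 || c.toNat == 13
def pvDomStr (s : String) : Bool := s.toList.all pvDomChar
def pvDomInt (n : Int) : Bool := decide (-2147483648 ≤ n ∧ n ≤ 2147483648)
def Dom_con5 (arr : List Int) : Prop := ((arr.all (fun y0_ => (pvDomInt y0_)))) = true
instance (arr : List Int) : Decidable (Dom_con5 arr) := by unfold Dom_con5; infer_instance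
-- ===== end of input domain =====

-- B replaces A's bulk counter mutation (inner 5-step subtract-and-check loop per seed) by a
-- single sliding-window pass over the sorted distinct values; objective: alternative algorithm.

-- ===== PORT A =====
-- inner loop: 'for i in range(5): if x+i not in count or count[x+i]<val: return False; count[x+i]-=val'
def subGo (d : PySem.Dict Int Int) (x val : Int) : List Int → Option (PySem.Dict Int Int)
  | [] => some d
  | i :: is =>
    if d.contains (x + i) = false ∨ d.getD (x + i) 0 < val then none
    else subGo (d.insert (x + i) (d.getD (x + i) 0 - val)) x val is

-- outer loop: 'for x in seeds: val=count[x]; if val: …'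
def aLoop : List Int → PySem.Dict Int Int → Bool
  | [], _ => true
  | x :: xs, d =>
    let val := d.getD x 0
    if val ≠ 0 then
      match subGo d x val (PySem.List.pyRange 0 5 1) with
      | none => false
      | some d' => aLoop xs d'
    else aLoop xs d

def con5 (arr : List Int) : Bool :=
  let count := PySem.Dict.counter arr
  let seeds := PySem.List.sorted count.keys (fun x => x) false
  aLoop seeds count

-- ===== PORT B =====
-- one pass; 'opened' = groups needing continuation, 'window' = new groups begun at recent values
def bLoop : List Int → PySem.Dict Int Int → Int → Int → List Int → Bool
  | [], _, opened, _, _ => opened == 0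
  | n :: ns, count, opened, last, window =>
    if opened > 0 ∧ n ≠ last + 1 then false
    else
      let cnt := count.getD n 0
      if cnt < opened then false
      else
        let w1 := window ++ [cnt - opened]
        if w1.length == 5 then bLoop ns count (cnt - w1.headI) n w1.tail
        else bLoop ns count cnt n w1

def con5_alt (arr : List Int) : Bool :=
  let count := PySem.Dict.counter arr
  bLoop (PySem.List.sorted count.keys (fun x => x) false) count 0 0 []

-- ===== PRECONDITION & SPEC =====
def Spec_con5 (arr : List Int) (out : Bool) : Prop := out = con5_alt arr
instance (arr : List Int) (out : Bool) : Decidable (Spec_con5 arr out) := by unfold Spec_con5; infer_instance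

-- ===== CLAIM (what is proved, stated in full; the proofs are below) =====
def Claim_equal_con5 : Prop := ∀ (arr : List Int), Dom_con5 arr → Spec_con5 arr (con5 arr)

-- ===== LEMMAS AND PROOFS =====

-- how much the open groups recorded in `window` (ending at value `last`) still owe to value y
def cover (last : Int) (window : List Int) (y : Int) : Int :=
  (window.drop (y + window.length - last - 5).toNat).sum

-- the window after one B step with count cnt and `opened` open groups
def wnext (window : List Int) (cnt opened : Int) : List Int :=
  if (window ++ [cnt - opened]).length = 5 then (window ++ [cnt - opened]).tail
  else window ++ [cnt - opened]

-- the `opened` value after that step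
def onext (window : List Int) (cnt opened : Int) : Int :=
  if (window ++ [cnt - opened]).length = 5 then cnt - (window ++ [cnt - opened]).headI
  else cnt

lemma sum_drop_append (w : List Int) (a : Int) (k : Nat) :
    ((w ++ [a]).drop k).sum = (w.drop k).sum + (if k ≤ w.length then a else 0) := by
  by_cases hk : k ≤ w.length
  · rw [List.drop_append_of_le_length hk, List.sum_append, if_pos hk]; simp
  · rw [if_neg hk, List.drop_eq_nil_of_le (by simp; omega), List.drop_eq_nil_of_le (by omega)]
    simp

lemma cover_nil (last y : Int) : cover last [] y = 0 := by
  unfold cover; simp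

lemma cover_nonneg (last y : Int) (w : List Int) (h : ∀ e ∈ w, 0 ≤ e) :
    0 ≤ cover last w y :=
  List.sum_nonneg (fun e he => h e (List.drop_subset _ _ he))

lemma cover_le_sum (last y : Int) (w : List Int) (h : ∀ e ∈ w, 0 ≤ e) :
    cover last w y ≤ w.sum := by
  set k := (y + (w.length : Int) - last - 5).toNat
  calc (w.drop k).sum ≤ (w.take k).sum + (w.drop k).sum := by
        have : 0 ≤ (w.take k).sum := List.sum_nonneg (fun e he => h e (List.take_subset _ _ he))
        omega
    _ = w.sum := by rw [← List.sum_append, List.take_append_drop]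

lemma cover_last_add_one (last : Int) (w : List Int) (h : w.length ≤ 4) :
    cover last w (last + 1) = w.sum := by
  unfold cover
  have : (last + 1 + (w.length : Int) - last - 5).toNat = 0 := by omega
  rw [this]; simp

lemma cover_append (last : Int) (w : List Int) (a y : Int) :
    cover (last + 1) (w ++ [a]) y = cover last w y + (if y ≤ last + 5 then a else 0) := by
  unfold cover
  have h1 : (y + ((w ++ [a]).length : Int) - (last + 1) - 5) = (y + (w.length : Int) - last - 5) := by
    simp; ring
  rw [h1, sum_drop_append]
  congr 1
  have hiff : ((y + (w.length : Int) - last - 5).toNat ≤ w.length) ↔ (y ≤ last + 5) := by omega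
  simp [hiff]

lemma cover_zeros (last y : Int) (w : List Int) (h : ∀ e ∈ w, e = 0) : cover last w y = 0 :=
  List.sum_eq_zero (fun e he => h e (List.drop_subset _ _ he))

lemma cover_zeros_append (n : Int) (w : List Int) (a y : Int) (h : ∀ e ∈ w, e = 0) :
    cover n (w ++ [a]) y = if y ≤ n + 4 then a else 0 := by
  unfold cover
  rw [sum_drop_append, List.sum_eq_zero (fun e he => h e (List.drop_subset _ _ he))]
  have hiff : ((y + ((w ++ [a]).length : Int) - n - 5).toNat ≤ w.length) ↔ (y ≤ n + 4) := by
    simp; omega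
  rw [zero_add, if_congr hiff rfl rfl]

lemma cover_tail (last y : Int) (f : Int) (rest : List Int) (hlen : rest.length = 4)
    (hy : last + 1 ≤ y) : cover last (f :: rest) y = cover last rest y := by
  unfold cover
  have h1 : (y + ((f :: rest).length : Int) - last - 5).toNat
      = (y + (rest.length : Int) - last - 5).toNat + 1 := by simp [hlen]; omega
  rw [h1, List.drop_succ_cons]

lemma sum_zero_all_zero (w : List Int) (h : ∀ e ∈ w, 0 ≤ e) (hs : w.sum = 0) :
    ∀ e ∈ w, e = 0 := by
  induction w with
  | nil => simp
  | cons x t ih =>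
    simp only [List.sum_cons] at hs
    have hx : 0 ≤ x := h x (by simp)
    have ht : 0 ≤ t.sum := List.sum_nonneg (fun e he => h e (by simp [he]))
    intro e he
    rcases List.mem_cons.mp he with rfl | he'
    · omega
    · exact ih (fun e' he' => h e' (by simp [he'])) (by omega) e he'

lemma cover_wnext (last n : Int) (w : List Int) (cnt opened y : Int)
    (h5 : w.length ≤ 4) (hcase : n = last + 1 ∨ ∀ e ∈ w, e = 0) (hy : n + 1 ≤ y) :
    cover n (wnext w cnt opened) y = cover last w y + (if y ≤ n + 4 then cnt - opened else 0) := by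
  have hmid : cover n (w ++ [cnt - opened]) y
      = cover last w y + (if y ≤ n + 4 then cnt - opened else 0) := by
    rcases hcase with rfl | hz
    · rw [cover_append]
      congr 1
      apply if_congr (by omega) rfl rfl
    · rw [cover_zeros_append _ _ _ _ hz, cover_zeros _ _ _ hz, zero_add]
  unfold wnext
  by_cases hl : (w ++ [cnt - opened]).length = 5
  · rw [if_pos hl]
    obtain ⟨f, rest, hfr⟩ : ∃ f rest, w ++ [cnt - opened] = f :: rest := by
      cases hw : w ++ [cnt - opened] with
      | nil => simp at hw
      | cons f rest => exact ⟨f, rest, rfl⟩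
    rw [hfr] at hmid hl ⊢
    simp only [List.tail_cons]
    rw [← cover_tail n y f rest (by simpa using hl) (by omega)]
    exact hmid
  · rw [if_neg hl]; exact hmid

lemma wnext_sum (w : List Int) (cnt opened : Int) (ho : opened = w.sum) :
    onext w cnt opened = (wnext w cnt opened).sum := by
  unfold onext wnext
  by_cases hl : (w ++ [cnt - opened]).length = 5
  · rw [if_pos hl, if_pos hl]
    obtain ⟨f, rest, hfr⟩ : ∃ f rest, w ++ [cnt - opened] = f :: rest := by
      cases hw : w ++ [cnt - opened] with
      | nil => simp at hw
      | cons f rest => exact ⟨f, rest, rfl⟩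
    have hsum : f + rest.sum = w.sum + (cnt - opened) := by
      rw [← List.sum_cons, ← hfr, List.sum_append]; simp
    rw [hfr]; simp only [List.headI, List.tail_cons]
    omega
  · rw [if_neg hl, if_neg hl, List.sum_append]; simp; omega

lemma wnext_len (w : List Int) (cnt opened : Int) (h : w.length ≤ 4) :
    (wnext w cnt opened).length ≤ 4 := by
  unfold wnext; split_ifs with hl
  · simp [List.length_tail, hl]
  · simp at hl ⊢; omega

lemma wnext_mem (w : List Int) (cnt opened : Int) (h : ∀ e ∈ w, 0 ≤ e)
    (ha : 0 ≤ cnt - opened) : ∀ e ∈ wnext w cnt opened, 0 ≤ e := by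
  have hall : ∀ e ∈ w ++ [cnt - opened], 0 ≤ e := by
    intro e he; rcases List.mem_append.mp he with h1 | h1
    · exact h e h1
    · simp at h1; omega
  unfold wnext; split_ifs with hl
  · exact fun e he => hall e (List.mem_of_mem_tail he)
  · exact hall

lemma wnext_ne_nil (w : List Int) (cnt opened : Int) (h : w.length ≤ 4) :
    wnext w cnt opened ≠ [] := by
  unfold wnext; split_ifs with hl
  · intro hc
    have := congrArg List.length hc
    simp [List.length_tail, hl] at this
  · simp

lemma bLoop_cons (ns : List Int) (c : PySem.Dict Int Int) (opened last n : Int)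
    (window : List Int) (hgap : ¬(opened > 0 ∧ n ≠ last + 1))
    (hcnt : ¬(c.getD n 0 < opened)) :
    bLoop (n :: ns) c opened last window =
      bLoop ns c (onext window (c.getD n 0) opened) n (wnext window (c.getD n 0) opened) := by
  rw [bLoop, if_neg hgap]
  simp only [if_neg hcnt]
  unfold onext wnext
  by_cases hl : (window ++ [c.getD n 0 - opened]).length = 5
  · simp only [if_pos hl, hl]; simp
  · simp only [if_neg hl]
    have : ((window ++ [c.getD n 0 - opened]).length == 5) = false := by
      simpa using hl
    simp [this]
    intro h4
    exact absurd (by simp [h4]) hl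

lemma bLoop_cons_gap (ns : List Int) (c : PySem.Dict Int Int) (opened last n : Int)
    (window : List Int) (hgap : opened > 0 ∧ n ≠ last + 1) :
    bLoop (n :: ns) c opened last window = false := by
  rw [bLoop, if_pos hgap]

lemma bLoop_cons_lt (ns : List Int) (c : PySem.Dict Int Int) (opened last n : Int)
    (window : List Int) (hgap : ¬(opened > 0 ∧ n ≠ last + 1))
    (hcnt : c.getD n 0 < opened) :
    bLoop (n :: ns) c opened last window = false := by
  rw [bLoop, if_neg hgap]
  simp only [if_pos hcnt]

lemma pyRange05 : PySem.List.pyRange 0 5 1 = [0, 1, 2, 3, 4] := by decide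

lemma aLoop_cons_zero (xs : List Int) (d : PySem.Dict Int Int) (x : Int)
    (h : ¬(d.getD x 0 ≠ 0)) : aLoop (x :: xs) d = aLoop xs d := by
  rw [aLoop]; simp only [if_neg h]

lemma aLoop_cons_none (xs : List Int) (d : PySem.Dict Int Int) (x : Int)
    (h : d.getD x 0 ≠ 0) (hn : subGo d x (d.getD x 0) (PySem.List.pyRange 0 5 1) = none) :
    aLoop (x :: xs) d = false := by
  rw [aLoop]; simp only [if_pos h, hn]

lemma aLoop_cons_some (xs : List Int) (d d' : PySem.Dict Int Int) (x : Int)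
    (h : d.getD x 0 ≠ 0) (hs : subGo d x (d.getD x 0) (PySem.List.pyRange 0 5 1) = some d') :
    aLoop (x :: xs) d = aLoop xs d' := by
  rw [aLoop]; simp only [if_pos h, hs]

lemma subGo_some_ind (x val : Int) (is : List Int) (hp : is.Pairwise (· < ·)) :
    ∀ d d' : PySem.Dict Int Int, subGo d x val is = some d' →
      (∀ y, d'.contains y = d.contains y) ∧
      (∀ y, d'.getD y 0 = d.getD y 0 - (if (y - x) ∈ is then val else 0)) ∧
      (∀ i ∈ is, d.contains (x + i) = true ∧ val ≤ d.getD (x + i) 0) := by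
  induction is with
  | nil =>
    intro d d' h
    rw [subGo] at h
    cases h
    exact ⟨fun y => rfl, fun y => by simp, fun i hi => by simp at hi⟩
  | cons i is ih =>
    intro d d' h
    by_cases hc : d.contains (x + i) = false ∨ d.getD (x + i) 0 < val
    · rw [subGo, if_pos hc] at h; simp at h
    rw [subGo, if_neg hc] at h
    push Not at hc
    obtain ⟨hc1, hc2⟩ := hc
    have hc1' : d.contains (x + i) = true := by
      cases hb : d.contains (x + i)
      · exact absurd hb hc1
      · rfl
    have hlt : ∀ b ∈ is, i < b := (List.pairwise_cons.mp hp).1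
    have hp' := (List.pairwise_cons.mp hp).2
    obtain ⟨A1, A2, A3⟩ := ih hp' _ _ h
    refine ⟨?_, ?_, ?_⟩
    · intro y
      rw [A1 y, PySem.Dict.contains_insert]
      by_cases hy : y = x + i
      · subst hy; simp [hc1']
      · simp [show (y == x + i) = false by simpa using hy]
    · intro y
      rw [A2 y, PySem.Dict.getD_insert]
      by_cases hy : y = x + i
      · subst hy
        rw [if_pos rfl]
        have hxi : x + i - x = i := by ring
        rw [hxi]
        have hni : i ∉ is := fun hmem => absurd (hlt _ hmem) (lt_irrefl i)
        rw [if_neg hni, if_pos (by simp)]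
        ring
      · rw [if_neg hy]
        have hiff : ((y - x) ∈ i :: is) ↔ ((y - x) ∈ is) := by
          simp only [List.mem_cons]
          constructor
          · rintro (h1 | h1)
            · exfalso; apply hy; omega
            · exact h1
          · exact fun h1 => Or.inr h1
        rw [if_congr hiff rfl rfl]
    · intro j hj
      rcases List.mem_cons.mp hj with rfl | hj'
      · exact ⟨hc1', by omega⟩
      · obtain ⟨B1, B2⟩ := A3 j hj'
        have hne : x + j ≠ x + i := by have := hlt _ hj'; omega
        constructor
        · rw [← B1, PySem.Dict.contains_insert,
            show ((x + j) == (x + i)) = false by simpa using hne]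
          simp
        · rw [PySem.Dict.getD_insert, if_neg hne] at B2
          exact B2

lemma subGo_none_ind (x val : Int) (is : List Int) (hp : is.Pairwise (· < ·)) :
    ∀ d : PySem.Dict Int Int, subGo d x val is = none →
      ∃ i ∈ is, (∀ j ∈ is, j < i → d.contains (x + j) = true ∧ val ≤ d.getD (x + j) 0) ∧
        (d.contains (x + i) = false ∨ d.getD (x + i) 0 < val) := by
  induction is with
  | nil => intro d h; rw [subGo] at h; cases h
  | cons i is ih =>
    intro d h
    by_cases hc : d.contains (x + i) = false ∨ d.getD (x + i) 0 < val
    · refine ⟨i, by simp, ?_, ?_⟩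
      · intro j hj hji
        rcases List.mem_cons.mp hj with rfl | hj'
        · omega
        · have := (List.pairwise_cons.mp hp).1 _ hj'
          omega
      · rcases hc with h1 | h1
        · exact Or.inl h1
        · exact Or.inr h1
    · rw [subGo, if_neg hc] at h
      push Not at hc
      obtain ⟨hc1, hc2⟩ := hc
      have hc1' : d.contains (x + i) = true := by
        cases hb : d.contains (x + i)
        · exact absurd hb hc1
        · rfl
      have hlt : ∀ b ∈ is, i < b := (List.pairwise_cons.mp hp).1
      obtain ⟨i', hi'mem, hprior, hfail⟩ := ih (List.pairwise_cons.mp hp).2 _ h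
      have hne' : ∀ j ∈ is, x + j ≠ x + i := by
        intro j hj; have := hlt _ hj; omega
      have htr : ∀ j ∈ is,
          ((d.insert (x + i) (d.getD (x + i) 0 - val)).contains (x + j) = d.contains (x + j))
          ∧ ((d.insert (x + i) (d.getD (x + i) 0 - val)).getD (x + j) 0 = d.getD (x + j) 0) := by
        intro j hj
        constructor
        · rw [PySem.Dict.contains_insert,
            show ((x + j) == (x + i)) = false by simpa using hne' j hj]
          simp
        · rw [PySem.Dict.getD_insert, if_neg (hne' j hj)]
      refine ⟨i', by simp [hi'mem], ?_, ?_⟩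
      · intro j hj hji
        rcases List.mem_cons.mp hj with rfl | hj'
        · exact ⟨hc1', by omega⟩
        · obtain ⟨B1, B2⟩ := hprior j hj' hji
          rw [(htr j hj').1] at B1
          rw [(htr j hj').2] at B2
          exact ⟨B1, B2⟩
      · rcases hfail with h1 | h1
        · rw [(htr i' hi'mem).1] at h1; exact Or.inl h1
        · rw [(htr i' hi'mem).2] at h1; exact Or.inr h1

lemma doom (c : PySem.Dict Int Int) : ∀ (ys : List Int) (opened last : Int)
    (window : List Int) (t : Int),
    ys.Pairwise (· < ·) →
    (∀ y ∈ ys, c.contains y = true) →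
    (∀ y : Int, c.contains y = true → y ∉ ys → y ≤ last) →
    (∀ y ∈ ys, last < y) →
    opened = window.sum → window.length ≤ 4 → (∀ e ∈ window, 0 ≤ e) →
    last < t → t ≤ last + 4 →
    (∀ u : Int, last < u → u < t → c.contains u = true) →
    (c.contains t = false ∨ c.getD t 0 < cover last window t) →
    0 < cover last window t →
    bLoop ys c opened last window = false := by
  intro ys
  induction ys with
  | nil =>
    intro opened last window t _ _ hproc _ h4 _ h6 hlt _ _ _ hcov
    have hle := cover_le_sum last t window h6
    rw [bLoop]
    have hne : opened ≠ 0 := by omega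
    simp [hne]
  | cons m ns ih =>
    intro opened last window t h1 h2 hproc hord h4 h5 h6 hlt hle hint hval hcov
    have hsle := cover_le_sum last t window h6
    have hop : 0 < opened := by omega
    have hmhead : m ∈ m :: ns := by simp
    by_cases hte : t = last + 1
    · by_cases htK : c.contains t = true
      · have htys : t ∈ m :: ns := by
          by_contra hh
          have := hproc t htK hh
          omega
        have hm : m = t := by
          rcases List.mem_cons.mp htys with rfl | hin
          · rfl
          · have h1' := (List.pairwise_cons.mp h1).1 _ hin
            have h2' := hord m hmhead
            omega
        have hv : c.getD t 0 < cover last window t := by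
          rcases hval with hf | hf
          · rw [htK] at hf; cases hf
          · exact hf
        apply bLoop_cons_lt
        · rintro ⟨_, hne⟩; exact hne (by omega)
        · have := cover_last_add_one last window h5
          rw [hm]
          rw [hte] at hv ⊢
          omega
      · have hmne : m ≠ last + 1 := by
          intro he
          have hK := h2 m hmhead
          rw [he, ← hte] at hK
          rw [hK] at htK
          exact htK rfl
        exact bLoop_cons_gap _ _ _ _ _ _ ⟨hop, hmne⟩
    · have hu : c.contains (last + 1) = true := hint (last + 1) (by omega) (by omega)
      have huys : last + 1 ∈ m :: ns := by
        by_contra hh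
        have := hproc _ hu hh
        omega
      have hm : m = last + 1 := by
        rcases List.mem_cons.mp huys with he | hin
        · exact he.symm
        · have h1' := (List.pairwise_cons.mp h1).1 _ hin
          have h2' := hord m hmhead
          omega
      by_cases hclt : c.getD m 0 < opened
      · exact bLoop_cons_lt _ _ _ _ _ _ (by rintro ⟨_, hne⟩; exact hne hm) hclt
      · rw [bLoop_cons _ _ _ _ _ _ (by rintro ⟨_, hne⟩; exact hne hm) hclt]
        have hnn : 0 ≤ c.getD m 0 - opened := by omega
        have hcw : cover m (wnext window (c.getD m 0) opened) t
            = cover last window t + (c.getD m 0 - opened) := by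
          rw [cover_wnext last m window (c.getD m 0) opened t h5 (Or.inl hm) (by omega)]
          rw [if_pos (by omega)]
        apply ih (onext window (c.getD m 0) opened) m (wnext window (c.getD m 0) opened) t
        · exact (List.pairwise_cons.mp h1).2
        · exact fun y hy => h2 y (by simp [hy])
        · intro y hcy hny
          by_cases hyn : y = m
          · omega
          · have hnotys : y ∉ m :: ns := by simp [hyn, hny]
            have := hproc y hcy hnotys
            omega
        · exact fun y hy => (List.pairwise_cons.mp h1).1 y hy
        · exact wnext_sum _ _ _ h4
        · exact wnext_len _ _ _ h5
        · exact wnext_mem _ _ _ h6 hnn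
        · omega
        · omega
        · exact fun u hmu hut => hint u (by omega) hut
        · rcases hval with hf | hf
          · exact Or.inl hf
          · right; omega
        · omega

lemma main_loop (c : PySem.Dict Int Int) : ∀ (ys : List Int) (d : PySem.Dict Int Int)
    (opened last : Int) (window : List Int),
    ys.Pairwise (· < ·) →
    (∀ y ∈ ys, c.contains y = true) →
    (∀ y : Int, c.contains y = true → y ∉ ys → y ≤ last) →
    (window ≠ [] → ∀ y ∈ ys, last < y) →
    (window = [] → ∀ y : Int, c.contains y = true → y ∈ ys) →
    opened = window.sum → window.length ≤ 4 → (∀ e ∈ window, 0 ≤ e) →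
    (∀ y, d.contains y = c.contains y) →
    (∀ y ∈ ys, d.getD y 0 = c.getD y 0 - cover last window y) →
    (∀ k : Int, last < k → 0 < cover last window k → c.contains k = true) →
    (∀ y ∈ ys, 0 ≤ d.getD y 0) →
    aLoop ys d = bLoop ys c opened last window := by
  intro ys
  induction ys with
  | nil =>
    intro d opened last window _ _ hproc _ _ h4 h5 h6 _ _ h8 _
    rw [aLoop, bLoop]
    have hnn : 0 ≤ opened := by
      rw [h4]; exact List.sum_nonneg h6
    have hle : opened ≤ 0 := by
      by_contra hh
      push Not at hh
      have hcv := cover_last_add_one last window h5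
      have hK : c.contains (last + 1) = true := h8 (last + 1) (by omega) (by omega)
      have := hproc _ hK (by simp)
      omega
    have h0 : opened = 0 := by omega
    simp [h0]
  | cons n ns ih =>
    intro d opened last window h1 h2 hproc hord hwin h4 h5 h6 hmem h7 h8 h9
    have hnys : n ∈ n :: ns := by simp
    have hOnn : 0 ≤ opened := by rw [h4]; exact List.sum_nonneg h6
    have hgap : ¬(opened > 0 ∧ n ≠ last + 1) := by
      rintro ⟨hop, hne⟩
      have hwne : window ≠ [] := by
        intro h0; rw [h0] at h4; simp at h4; omega
      have hcv := cover_last_add_one last window h5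
      have hK : c.contains (last + 1) = true := h8 (last + 1) (by omega) (by omega)
      have hys : last + 1 ∈ n :: ns := by
        by_contra hh
        have := hproc _ hK hh
        omega
      have hnlast := hord hwne n hnys
      rcases List.mem_cons.mp hys with he | hin
      · exact hne he.symm
      · have := (List.pairwise_cons.mp h1).1 _ hin
        omega
    have hcase : n = last + 1 ∨ ∀ e ∈ window, e = 0 := by
      by_cases hop : 0 < opened
      · left; by_contra hne; exact hgap ⟨hop, hne⟩
      · right; exact sum_zero_all_zero _ h6 (by omega)
    have hcovn : cover last window n = opened := by
      rcases hcase with rfl' | hz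
      · rw [rfl', cover_last_add_one last window h5, ← h4]
      · rw [cover_zeros _ _ _ hz]
        have : window.sum = 0 := List.sum_eq_zero hz
        omega
    have hdn : 0 ≤ d.getD n 0 := h9 n hnys
    have hcnt_eq : d.getD n 0 = c.getD n 0 - opened := by
      rw [h7 n hnys, hcovn]
    have hcnt : ¬(c.getD n 0 < opened) := by omega
    have hvc : c.getD n 0 - opened = d.getD n 0 := by omega
    have hord' : ∀ y ∈ ns, n < y := (List.pairwise_cons.mp h1).1
    have hproc' : ∀ y : Int, c.contains y = true → y ∉ ns → y ≤ n := by
      intro y hcy hny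
      by_cases hyn : y = n
      · omega
      · have hnotys : y ∉ n :: ns := by simp [hyn, hny]
        have hle := hproc y hcy hnotys
        by_cases hw0 : window = []
        · exact absurd (hwin hw0 y hcy) hnotys
        · have := hord hw0 n hnys; omega
    have hcoldK : ∀ k : Int, n < k → 0 < cover last window k → c.contains k = true := by
      intro k hk hc
      by_cases hw0 : window = []
      · rw [hw0, cover_nil] at hc; omega
      · exact h8 k (by have := hord hw0 n hnys; omega) hc
    have hcw : ∀ y : Int, n + 1 ≤ y →
        cover n (wnext window (c.getD n 0) opened) y
          = cover last window y + (if y ≤ n + 4 then c.getD n 0 - opened else 0) :=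
      fun y hy => cover_wnext last n window (c.getD n 0) opened y h5 hcase hy
    rw [bLoop_cons ns c opened last n window hgap hcnt]
    by_cases hv0 : d.getD n 0 ≠ 0
    · have hvpos : 0 < d.getD n 0 := by omega
      cases hsub : subGo d n (d.getD n 0) (PySem.List.pyRange 0 5 1) with
      | some d' =>
        rw [aLoop_cons_some ns d d' n hv0 hsub]
        rw [pyRange05] at hsub
        obtain ⟨A1, A2, A3⟩ := subGo_some_ind n (d.getD n 0) _ (by decide) d d' hsub
        apply ih d' (onext window (c.getD n 0) opened) n (wnext window (c.getD n 0) opened)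
          (List.pairwise_cons.mp h1).2 (fun y hy => h2 y (by simp [hy])) hproc'
          (fun _ => hord') (fun hw => absurd hw (wnext_ne_nil _ _ _ h5))
          (wnext_sum _ _ _ h4) (wnext_len _ _ _ h5) (wnext_mem _ _ _ h6 (by omega))
          (fun y => (A1 y).trans (hmem y))
        · intro y hy
          have hyn := hord' y hy
          have hmm : ((y - n) ∈ ([0, 1, 2, 3, 4] : List Int)) ↔ (y ≤ n + 4) := by
            simp; omega
          rw [A2 y, h7 y (by simp [hy]), hcw y (by omega), if_congr hmm rfl rfl, hvc]
          split_ifs with hc4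
          · ring
          · ring
        · intro k hk hc
          rw [hcw k (by omega)] at hc
          by_cases hcold : 0 < cover last window k
          · exact hcoldK k hk hcold
          · have hnn2 := cover_nonneg last k window h6
            have hk4 : k ≤ n + 4 := by
              by_contra hh
              rw [if_neg hh] at hc
              omega
            have hkm : (k - n) ∈ ([0, 1, 2, 3, 4] : List Int) := by simp; omega
            have := (A3 (k - n) hkm).1
            rw [show n + (k - n) = k by ring, hmem k] at this
            exact this
        · intro y hy
          have hyn := hord' y hy
          rw [A2 y]
          by_cases hy4 : (y - n) ∈ ([0, 1, 2, 3, 4] : List Int)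
          · have := (A3 (y - n) hy4).2
            rw [show n + (y - n) = y by ring] at this
            rw [if_pos hy4]
            omega
          · rw [if_neg hy4]
            have := h9 y (by simp [hy])
            omega
      | none =>
        rw [aLoop_cons_none ns d n hv0 hsub]
        rw [pyRange05] at hsub
        obtain ⟨i, himem, hprior, hfail⟩ := subGo_none_ind n (d.getD n 0) _ (by decide) d hsub
        have hi04 : i = 0 ∨ i = 1 ∨ i = 2 ∨ i = 3 ∨ i = 4 := by simpa using himem
        have hi0 : i ≠ 0 := by
          rintro rfl
          rcases hfail with hf | hf
          · rw [show n + (0 : Int) = n by ring, hmem n, h2 n hnys] at hf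
            cases hf
          · rw [show n + (0 : Int) = n by ring] at hf
            omega
        have hcovnn := cover_nonneg last (n + i) window h6
        have hcwt : cover n (wnext window (c.getD n 0) opened) (n + i)
            = cover last window (n + i) + d.getD n 0 := by
          rw [hcw (n + i) (by omega), if_pos (by omega), hvc]
        symm
        apply doom c ns (onext window (c.getD n 0) opened) n
          (wnext window (c.getD n 0) opened) (n + i)
          (List.pairwise_cons.mp h1).2 (fun y hy => h2 y (by simp [hy])) hproc' hord'
          (wnext_sum _ _ _ h4) (wnext_len _ _ _ h5) (wnext_mem _ _ _ h6 (by omega))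
          (by omega) (by omega)
        · intro u hnu hut
          have hjm : (u - n) ∈ ([0, 1, 2, 3, 4] : List Int) := by simp; omega
          have := (hprior (u - n) hjm (by omega)).1
          rw [show n + (u - n) = u by ring, hmem u] at this
          exact this
        · by_cases htK : c.contains (n + i) = true
          · right
            have htys : (n + i) ∈ n :: ns := by
              by_contra hh
              by_cases hw0 : window = []
              · exact hh (hwin hw0 _ htK)
              · have := hproc _ htK hh
                have := hord hw0 n hnys
                omega
            have h7t := h7 (n + i) htys
            rcases hfail with hf | hf
            · rw [hmem (n + i), htK] at hf; cases hf
            · rw [hcwt]; omega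
          · left
            cases hb : c.contains (n + i)
            · rfl
            · exact absurd hb htK
        · rw [hcwt]; omega
    · rw [aLoop_cons_zero ns d n hv0]
      have hv00 : d.getD n 0 = 0 := by
        by_contra hh; exact hv0 hh
      apply ih d (onext window (c.getD n 0) opened) n (wnext window (c.getD n 0) opened)
        (List.pairwise_cons.mp h1).2 (fun y hy => h2 y (by simp [hy])) hproc'
        (fun _ => hord') (fun hw => absurd hw (wnext_ne_nil _ _ _ h5))
        (wnext_sum _ _ _ h4) (wnext_len _ _ _ h5) (wnext_mem _ _ _ h6 (by omega))
        hmem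
      · intro y hy
        have hyn := hord' y hy
        rw [h7 y (by simp [hy]), hcw y (by omega), hvc, hv00]
        split_ifs with hc4
        · ring
        · ring
      · intro k hk hc
        rw [hcw k (by omega), hvc, hv00] at hc
        have : 0 < cover last window k := by
          split_ifs at hc with hh
          · omega
          · omega
        exact hcoldK k hk this
      · exact fun y hy => h9 y (by simp [hy])

-- ===== VERDICT (by name: the statement is the Claim_ definition above) =====
theorem con5_spec : Claim_equal_con5 := by
  intro arr _
  show con5 arr = con5_alt arr
  show aLoop (PySem.List.sorted (PySem.Dict.counter arr).keys (fun x => x) false)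
      (PySem.Dict.counter arr)
    = bLoop (PySem.List.sorted (PySem.Dict.counter arr).keys (fun x => x) false)
      (PySem.Dict.counter arr) 0 0 []
  have hkeys : (PySem.Dict.counter arr).keys = PySem.Set.ofList arr :=
    PySem.Dict.keys_counter arr
  have hmemseeds : ∀ y : Int, (PySem.Dict.counter arr).contains y = true →
      y ∈ PySem.List.sorted (PySem.Dict.counter arr).keys (fun x => x) false := by
    intro y hy
    rw [PySem.List.mem_sorted]
    exact (PySem.Dict.contains_iff_mem_keys _ _).mp hy
  apply main_loop
  · rw [hkeys]
    exact PySem.List.sorted_ofList_pairwise_lt arr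
  · intro y hy
    rw [PySem.List.mem_sorted] at hy
    exact (PySem.Dict.contains_iff_mem_keys _ _).mpr hy
  · intro y hc hny
    exact absurd (hmemseeds y hc) hny
  · intro h; exact absurd rfl h
  · intro _; exact hmemseeds
  · simp
  · simp
  · simp
  · intro y; rfl
  · intro y _
    rw [cover_nil]; ring
  · intro k _ hc
    rw [cover_nil] at hc; omega
  · intro y _
    rw [PySem.Dict.getD_counter]
    exact_mod_cast Nat.zero_le _
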